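-- pv_equiv track=rewrite | github.com/AngeloAntona/Emolyser | code2.py | transpose_sequence
-- ===== SOURCE A (Python) =====
-- EOS_TOKEN = 129
--
-- START_TOKEN = 130
--
-- PAD_TOKEN = 0
--
-- def transpose_sequence(seq, offset):
--     """
--     Traspone una sequenza (lista di token) di un certo offset.
--     I token rappresentano pitch+1. Ritorna None se la trasposizione
--     esce dal range [1, 128].
--     """
--     transposed = []
--     for token in seq:
--         if token in (PAD_TOKEN, START_TOKEN, EOS_TOKEN):
--             transposed.append(token)
--         else:
--             # token = pitch + 1 → pitch = token - 1
--             new_pitch = (token - 1) + offset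
--             if new_pitch < 0 or new_pitch > 127:
--                 return None  # Trasposizione non valida
--             transposed.append(new_pitch + 1)
--     return transposed
-- ===== SOURCE B (Python) =====
-- EOS_TOKEN = 129
-- START_TOKEN = 130
-- PAD_TOKEN = 0
--
-- SPECIAL = (PAD_TOKEN, START_TOKEN, EOS_TOKEN)
--
-- def transpose_sequence(seq, offset):
--     # Validation pass: any non-special token whose transposed pitch leaves [0,127] -> None
--     if any(not (0 <= (t - 1) + offset <= 127)
--            for t in seq if t not in SPECIAL):
--         return None
--     # Construction pass
--     return [t if t in SPECIAL else (t - 1) + offset + 1 for t in seq]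
-- ===== Notes on version B (the rewrite author's own statement) =====
-- stated objective: alternative
-- what changed: Replaced the fused fail-fast loop by two separately-shaped passes: an any()-based validation pass over non-special tokens, then a list comprehension building the output; A's early return and B's full validation yield the same None.
import Mathlib
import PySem

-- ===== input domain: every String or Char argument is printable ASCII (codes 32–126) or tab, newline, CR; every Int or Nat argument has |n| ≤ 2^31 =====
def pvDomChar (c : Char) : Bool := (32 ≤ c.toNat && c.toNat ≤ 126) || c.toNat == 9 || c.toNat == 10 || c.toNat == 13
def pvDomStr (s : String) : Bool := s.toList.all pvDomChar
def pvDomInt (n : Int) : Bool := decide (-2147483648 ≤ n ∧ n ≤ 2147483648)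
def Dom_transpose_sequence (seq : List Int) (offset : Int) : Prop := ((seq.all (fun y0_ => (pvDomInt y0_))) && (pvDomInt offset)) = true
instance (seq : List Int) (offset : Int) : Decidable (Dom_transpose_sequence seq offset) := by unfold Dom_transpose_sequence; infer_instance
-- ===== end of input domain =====

-- B separates A's fused fail-fast loop into a validation pass (any) plus a list-comprehension construction pass; same return value.


-- ===== PORT A =====
-- A's loop with early return: structural recursion carrying the accumulator `transposed`.
def transpose_sequence_go (offset : Int) : List Int → List Int → Option (List Int)
  | [], transposed => some transposed.reverse
  | token :: rest, transposed =>
      if token = 0 ∨ token = 130 ∨ token = 129 then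
        transpose_sequence_go offset rest (token :: transposed)
      else
        let new_pitch := (token - 1) + offset
        if new_pitch < 0 ∨ new_pitch > 127 then none
        else transpose_sequence_go offset rest ((new_pitch + 1) :: transposed)

def transpose_sequence (seq : List Int) (offset : Int) : Option (List Int) :=
  transpose_sequence_go offset seq []

-- ===== PORT B =====
def pvSpecial (t : Int) : Bool := t == 0 || t == 130 || t == 129

def transpose_sequence_alt (seq : List Int) (offset : Int) : Option (List Int) :=
  if seq.any (fun t => !pvSpecial t && !(0 ≤ (t - 1) + offset ∧ (t - 1) + offset ≤ 127)) then
    none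
  else
    some (seq.map (fun t => if pvSpecial t then t else (t - 1) + offset + 1))

-- ===== PRECONDITION & SPEC =====
def Spec_transpose_sequence (seq : List Int) (offset : Int) (out : Option (List Int)) : Prop := out = transpose_sequence_alt seq offset
instance (seq : List Int) (offset : Int) (out : Option (List Int)) : Decidable (Spec_transpose_sequence seq offset out) := by unfold Spec_transpose_sequence; infer_instance

-- ===== CLAIM (what is proved, stated in full; the proofs are below) =====
def Claim_equal_transpose_sequence : Prop := ∀ (seq : List Int) (offset : Int), Dom_transpose_sequence seq offset → Spec_transpose_sequence seq offset (transpose_sequence seq offset)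

-- ===== LEMMAS AND PROOFS =====
theorem transpose_sequence_go_eq (offset : Int) (seq acc : List Int) :
    transpose_sequence_go offset seq acc =
      if seq.any (fun t => !pvSpecial t && !(0 ≤ (t - 1) + offset ∧ (t - 1) + offset ≤ 127)) then
        none
      else
        some (acc.reverse ++ seq.map (fun t => if pvSpecial t then t else (t - 1) + offset + 1)) := by
  induction seq generalizing acc with
  | nil => simp [transpose_sequence_go]
  | cons t rest ih =>
      by_cases hs : t = 0 ∨ t = 130 ∨ t = 129
      · have hsp : pvSpecial t = true := by
          rcases hs with h | h | h <;> simp [pvSpecial, h]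
        simp [transpose_sequence_go, hs, ih, List.any_cons, hsp]
      · have hsp : pvSpecial t = false := by
          simp only [pvSpecial, Bool.or_eq_false_iff, beq_eq_false_iff_ne]
          exact ⟨⟨fun h => hs (Or.inl h), fun h => hs (Or.inr (Or.inl h))⟩,
                 fun h => hs (Or.inr (Or.inr h))⟩
        by_cases hr : (t - 1) + offset < 0 ∨ (t - 1) + offset > 127
        · have hcond : ¬ (0 ≤ (t - 1) + offset ∧ (t - 1) + offset ≤ 127) := by omega
          simp [transpose_sequence_go, hs, hr, List.any_cons, hsp, hcond]
        · have hok : 0 ≤ (t - 1) + offset ∧ (t - 1) + offset ≤ 127 := by omega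
          simp [transpose_sequence_go, hs, hr, ih, List.any_cons, hsp, hok]

-- ===== VERDICT (by name: the statement is the Claim_ definition above) =====
theorem transpose_sequence_spec : Claim_equal_transpose_sequence := by
  intro seq offset _
  unfold Spec_transpose_sequence transpose_sequence transpose_sequence_alt
  rw [transpose_sequence_go_eq]
  simp
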